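-- pv_equiv track=rewrite | github.com/chenyuyang1991/cnc_v1_scenario | cnc/src/code_parsing/code_parsing.py | remove_balanced_parentheses
-- ===== SOURCE A (Python) =====
-- def remove_balanced_parentheses(s: str) -> str:
--     """
--     從字串中移除所有完整匹配的括號及其內部內容，
--     若遇到不匹配的括號則保留原有符號。
--
--     例如：
--       "df(sdfss)" 輸出 "df"
--       "(dsdf(sdfss)dds" 輸出 "(dsdfdds"
--     """
--     # 建立一個和字串長度相同的布林清單，預設每個位置皆保留（True）
--     keep = [True] * len(s)
--     # 使用堆疊記錄已出現的開括號的索引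
--     stack = []
--     for i, char in enumerate(s):
--         if char == "(":
--             stack.append(i)
--         elif char == ")":
--             if stack:
--                 start = stack.pop()
--                 # 將從開始到目前索引的所有字元標記為 False，即移除
--                 for j in range(start, i + 1):
--                     keep[j] = False
--     # 組合保留的字元並去除首尾空白
--     return "".join(s[i] for i in range(len(s)) if keep[i]).strip()
-- ===== SOURCE B (Python) =====
-- def remove_balanced_parentheses(s: str) -> str:
--     out = []
--     stack = []  # lengths of `out` at each unmatched "(" so far
--     for char in s:
--         if char == "(":
--             stack.append(len(out))
--             out.append(char)
--         elif char == ")":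
--             if stack:
--                 del out[stack.pop():]
--             else:
--                 out.append(char)
--         else:
--             out.append(char)
--     return "".join(out).strip()
-- ===== Notes on version B (the rewrite author's own statement) =====
-- stated objective: faster
-- what changed: Instead of a boolean keep-array with an O(n) re-marking inner loop per matched pair, B builds the output once, pushing the output length at each '(' and truncating back to it when the matching ')' arrives, so each character is appended/deleted O(1) amortized.
import Mathlib
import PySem

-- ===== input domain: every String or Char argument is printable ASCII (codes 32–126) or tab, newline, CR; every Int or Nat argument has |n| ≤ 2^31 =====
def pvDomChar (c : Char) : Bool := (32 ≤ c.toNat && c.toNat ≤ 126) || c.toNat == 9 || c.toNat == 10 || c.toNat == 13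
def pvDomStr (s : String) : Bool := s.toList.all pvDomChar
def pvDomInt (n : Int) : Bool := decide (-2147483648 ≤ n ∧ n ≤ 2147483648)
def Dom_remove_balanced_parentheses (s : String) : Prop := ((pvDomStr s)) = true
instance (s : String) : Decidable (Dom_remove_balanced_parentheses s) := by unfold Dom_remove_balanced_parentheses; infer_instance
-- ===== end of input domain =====

-- B replaces A's boolean keep-array (re-marked by an inner loop at every matched pair)
-- with a single pass that truncates the growing output back to the recorded length when
-- a matching ')' closes; objective: faster (asymptotic).

-- ===== PORT A =====
-- inner loop "for j in range(start, i+1): keep[j] = False" (n = i+1-start iterations)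
def pvMarkRange (keep : List Bool) (a n : Nat) : List Bool :=
  match n with
  | 0 => keep
  | n + 1 => pvMarkRange (keep.set a false) (a + 1) n

-- the main "for i, char in enumerate(s)" loop; i is the index of the next char
def pvLoopA : List Char → Nat → List Bool → List Nat → List Bool × List Nat
  | [], _, keep, stack => (keep, stack)
  | c :: cs, i, keep, stack =>
    if c = '(' then pvLoopA cs (i + 1) keep (i :: stack)
    else if c = ')' then
      match stack with
      | [] => pvLoopA cs (i + 1) keep []
      | start :: rest => pvLoopA cs (i + 1) (pvMarkRange keep start (i + 1 - start)) rest
    else pvLoopA cs (i + 1) keep stack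

def remove_balanced_parentheses (s : String) : String :=
  let cs := s.toList
  let keep := (pvLoopA cs 0 (List.replicate cs.length true) []).1
  PySem.Str.strip (String.ofList ((cs.zip keep).filterMap (fun p => if p.2 then some p.1 else none)))

-- ===== PORT B =====
-- one pass: push len(out) at '(', truncate out back to it at a matching ')'
def pvLoopB : List Char → List Char → List Nat → List Char × List Nat
  | [], out, stack => (out, stack)
  | c :: cs, out, stack =>
    if c = '(' then pvLoopB cs (out ++ [c]) (out.length :: stack)
    else if c = ')' then
      match stack with
      | [] => pvLoopB cs (out ++ [c]) []
      | p :: rest => pvLoopB cs (out.take p) rest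
    else pvLoopB cs (out ++ [c]) stack

def remove_balanced_parentheses_alt (s : String) : String :=
  PySem.Str.strip (String.ofList (pvLoopB s.toList [] []).1)

-- ===== PRECONDITION & SPEC =====
def Spec_remove_balanced_parentheses (s : String) (out : String) : Prop := out = remove_balanced_parentheses_alt s
instance (s : String) (out : String) : Decidable (Spec_remove_balanced_parentheses s out) := by unfold Spec_remove_balanced_parentheses; infer_instance

-- ===== CLAIM (what is proved, stated in full; the proofs are below) =====
def Claim_equal_remove_balanced_parentheses : Prop := ∀ (s : String), Dom_remove_balanced_parentheses s → Spec_remove_balanced_parentheses s (remove_balanced_parentheses s)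

-- ===== LEMMAS AND PROOFS =====

-- the characters of `pre` kept according to the flags `kp`
def pvKept (pre : List Char) (kp : List Bool) : List Char :=
  (pre.zip kp).filterMap (fun p => if p.2 then some p.1 else none)

-- relation between A's index stack and B's length stack, relative to the processed prefix
def pvStackInv : List Nat → List Nat → List Char → List Bool → Prop
  | [], [], _, _ => True
  | a :: sa, b :: sb, pre, kp =>
      a < pre.length ∧ b = (pvKept (pre.take a) (kp.take a)).length ∧
        pvStackInv sa sb (pre.take a) (kp.take a)
  | _, _, _, _ => False

lemma pvKept_append {p1 p2 : List Char} {k1 k2 : List Bool} (h : p1.length = k1.length) :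
    pvKept (p1 ++ p2) (k1 ++ k2) = pvKept p1 k1 ++ pvKept p2 k2 := by
  simp [pvKept, List.zip_append h, List.filterMap_append]

lemma pvKept_false : ∀ (p : List Char) (n : Nat), pvKept p (List.replicate n false) = [] := by
  intro p
  induction p with
  | nil => intro n; simp [pvKept]
  | cons c p ih =>
    intro n
    cases n with
    | zero => simp [pvKept]
    | succ n => simpa [pvKept, List.replicate_succ] using ih n

lemma pvMarkRange_eq : ∀ (n a : Nat) (keep : List Bool), a + n ≤ keep.length →
    pvMarkRange keep a n = keep.take a ++ List.replicate n false ++ keep.drop (a + n) := by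
  intro n
  induction n with
  | zero => intro a keep h; simp [pvMarkRange]
  | succ n ih =>
    intro a keep h
    rw [pvMarkRange, ih (a+1) (keep.set a false) (by simp; omega)]
    rw [List.set_eq_take_append_cons_drop, if_pos (by omega)]
    have ha : a ≤ keep.length := by omega
    rw [List.take_append, List.drop_append]
    simp [Nat.min_eq_left ha, List.take_take]
    rw [show a + 1 + n - a = n + 1 by omega]
    have h3 : List.drop (a+1+n) (List.take a keep) = [] := by
      apply List.drop_eq_nil_of_le; simp; omega
    simp [h3, List.replicate_succ, List.drop_drop]
    congr 1
    omega

lemma pvStackInv_append (sa sb : List Nat) (pre : List Char) (kp : List Bool)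
    (p2 : List Char) (k2 : List Bool) (hlen : pre.length ≤ kp.length)
    (h : pvStackInv sa sb pre kp) :
    pvStackInv sa sb (pre ++ p2) (kp ++ k2) := by
  cases sa with
  | nil => cases sb with
    | nil => trivial
    | cons b sb => exact absurd h (by simp [pvStackInv])
  | cons a sa => cases sb with
    | nil => exact absurd h (by simp [pvStackInv])
    | cons b sb =>
      obtain ⟨h1, h2, h3⟩ := h
      refine ⟨by simp; omega, ?_, ?_⟩
      · rwa [List.take_append_of_le_length (by omega), List.take_append_of_le_length (by omega)]
      · rwa [List.take_append_of_le_length (by omega), List.take_append_of_le_length (by omega)]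

lemma pvLoop_eq : ∀ (t pre : List Char) (kp : List Bool) (sa sb : List Nat),
    kp.length = pre.length → pvStackInv sa sb pre kp →
    pvKept (pre ++ t) (pvLoopA t pre.length (kp ++ List.replicate t.length true) sa).1
      = (pvLoopB t (pvKept pre kp) sb).1 := by
  intro t
  induction t with
  | nil => intro pre kp sa sb hlen hinv; simp [pvLoopA, pvLoopB]
  | cons c t ih =>
    intro pre kp sa sb hlen hinv
    by_cases hc1 : c = '('
    · -- push
      subst hc1
      simp only [pvLoopA, pvLoopB, reduceIte, List.length_cons, List.replicate_succ]
      have tkp : (kp ++ [true]).take pre.length = kp := by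
        rw [← hlen]; exact List.take_left
      have tpp : (pre ++ ['(']).take pre.length = pre := List.take_left
      have hinv' : pvStackInv (pre.length :: sa) ((pvKept pre kp).length :: sb)
          (pre ++ ['(']) (kp ++ [true]) :=
        ⟨by simp, by rw [tkp, tpp], by rw [tkp, tpp]; exact hinv⟩
      have key := ih (pre ++ ['(']) (kp ++ [true]) (pre.length :: sa)
        ((pvKept pre kp).length :: sb) (by simp [hlen]) hinv'
      rw [pvKept_append hlen.symm] at key
      rw [show pre ++ '(' :: t = (pre ++ ['(']) ++ t by simp,
        show kp ++ true :: List.replicate t.length true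
            = (kp ++ [true]) ++ List.replicate t.length true by simp,
        show pre.length + 1 = (pre ++ ['(']).length by simp, key]
      simp [pvKept]
    · by_cases hc2 : c = ')'
      · subst hc2
        cases sa with
        | nil =>
          cases sb with
          | cons b sb => exact absurd hinv (by simp [pvStackInv])
          | nil =>
            -- unmatched ')': kept, like an ordinary character
            simp only [pvLoopA, pvLoopB, reduceIte, if_neg hc1, List.length_cons, List.replicate_succ]
            have key := ih (pre ++ [')']) (kp ++ [true]) [] [] (by simp [hlen])
              (pvStackInv_append [] [] pre kp [')'] [true] (le_of_eq hlen.symm) hinv)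
            rw [pvKept_append hlen.symm] at key
            rw [show pre ++ ')' :: t = (pre ++ [')']) ++ t by simp,
              show kp ++ true :: List.replicate t.length true
                  = (kp ++ [true]) ++ List.replicate t.length true by simp,
              show pre.length + 1 = (pre ++ [')']).length by simp, key]
            simp [pvKept]
        | cons a sa' =>
          cases sb with
          | nil => exact absurd hinv (by simp [pvStackInv])
          | cons b sb' =>
            simp only [pvLoopA, pvLoopB, reduceIte, if_neg hc1]
            obtain ⟨h1, h2, h3⟩ := hinv
            have hak : a ≤ kp.length := by omega
            have hap : a ≤ pre.length := by omega
            set m := pre.length - a with hm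
            -- the flags after A's marking pass, split as new prefix ++ untouched tail
            set kp' := kp.take a ++ List.replicate m false ++ [false] with hkp'
            have hmark : pvMarkRange (kp ++ List.replicate (t.length + 1) true) a
                (pre.length + 1 - a) = kp' ++ List.replicate t.length true := by
              rw [pvMarkRange_eq _ _ _ (by simp; omega)]
              rw [List.take_append, List.drop_append]
              rw [show a - kp.length = 0 by omega]
              rw [show a + (pre.length + 1 - a) - kp.length = 1 by omega]
              have e2 : List.drop (a + (pre.length + 1 - a)) kp = [] := by
                apply List.drop_eq_nil_of_le; omega
              have e4 : List.drop 1 (List.replicate (t.length + 1) true)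
                  = List.replicate t.length true := by simp [List.replicate_succ]
              rw [e2, e4, show pre.length + 1 - a = m + 1 by omega, List.replicate_succ']
              simp [hkp', List.replicate_succ']
            have hkplen : kp'.length = pre.length + 1 := by
              simp [hkp', Nat.min_eq_left hak]; omega
            have hlt : (List.take a pre).length = (List.take a kp).length := by
              simp [Nat.min_eq_left hap, Nat.min_eq_left hak]
            -- B's truncation equals the kept characters of the new prefix
            have hsplit2 : pvKept pre kp
                = pvKept (pre.take a) (kp.take a) ++ pvKept (pre.drop a) (kp.drop a) := by
              conv_lhs => rw [← List.take_append_drop a pre, ← List.take_append_drop a kp]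
              exact pvKept_append hlt
            have hr : pvKept (pre ++ [')']) kp' = pvKept (pre.take a) (kp.take a) := by
              rw [hkp', show pre ++ [')'] = (pre.take a) ++ (pre.drop a ++ [')']) by
                  rw [← List.append_assoc, List.take_append_drop],
                List.append_assoc (kp.take a),
                pvKept_append hlt,
                show List.replicate m false ++ [false] = List.replicate (m + 1) false from
                  (List.replicate_succ' ..).symm,
                pvKept_false]
              simp
            have hout : (pvKept pre kp).take b = pvKept (pre ++ [')']) kp' := by
              rw [hsplit2, h2, hr]; exact List.take_left
            have hinv' : pvStackInv sa' sb' (pre ++ [')']) kp' := by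
              have := pvStackInv_append sa' sb' (pre.take a) (kp.take a)
                (pre.drop a ++ [')']) (List.replicate m false ++ [false])
                (le_of_eq hlt) h3
              rwa [← List.append_assoc, List.take_append_drop, ← List.append_assoc] at this
            have key := ih (pre ++ [')']) kp' sa' sb' (by simp [hkplen]) hinv'
            simp only [List.length_cons]
            rw [hmark, hout]
            rw [show pre ++ ')' :: t = (pre ++ [')']) ++ t by simp,
              show pre.length + 1 = (pre ++ [')']).length by simp, key]
      · -- ordinary character
        simp only [pvLoopA, pvLoopB, if_neg hc1, if_neg hc2, List.length_cons,
          List.replicate_succ]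
        have key := ih (pre ++ [c]) (kp ++ [true]) sa sb (by simp [hlen])
          (pvStackInv_append sa sb pre kp [c] [true] (le_of_eq hlen.symm) hinv)
        rw [pvKept_append hlen.symm] at key
        rw [show pre ++ c :: t = (pre ++ [c]) ++ t by simp,
          show kp ++ true :: List.replicate t.length true
              = (kp ++ [true]) ++ List.replicate t.length true by simp,
          show pre.length + 1 = (pre ++ [c]).length by simp, key]
        simp [pvKept]

-- ===== VERDICT (by name: the statement is the Claim_ definition above) =====
theorem remove_balanced_parentheses_spec : Claim_equal_remove_balanced_parentheses := by
  intro s _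
  unfold Spec_remove_balanced_parentheses remove_balanced_parentheses remove_balanced_parentheses_alt
  have h := pvLoop_eq s.toList [] [] [] [] (by simp) trivial
  simp [pvKept] at h
  simp [h]
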